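-- pv_equiv track=rewrite | github.com/russ-hensel/smart_clipboard | cmd_processor.py | transform_un_dent
-- ===== SOURCE A (Python) =====
-- def transform_un_dent( in_text,  ):
--     """
--     find no of spaces on first line and remove from rest of lines
--     return tuple
--     """
--     lines             = in_text.split( "\n" )
--
--     if len( lines ) < 1:
--         return ( False, "un_dent", "" )
--
--     no_blank = 0
--     for  i_char in lines[0]:
--         if i_char != " ":
--             break
--         no_blank += 1
--     if no_blank == 0:
--         return ( False, "un_dent", "" )
--
--     delete_me         = " " * no_blank
--     new_lines         = []
--     # now work through lines
--     for i_line  in lines: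
--         ix_del   = i_line.find( delete_me, 0, )
--         if ix_del == 0:
--             new_lines.append( i_line[ no_blank: ] )
--         else:
--             new_lines.append( i_line )
--             # should not happen, but could ( bad copy )
--
--     #rint new_lines
--
--     ret_text     = "\n".join( new_lines )
--
--     return ( True, "un_dentn", ret_text )
-- ===== SOURCE B (Python) =====
-- def transform_un_dent(in_text):
--     """
--     find no of spaces on first line and remove from rest of lines
--     return tuple
--     """
--     # leading spaces of the first line = leading spaces of the whole text
--     # (a '\n' stops the run just like any other non-space character)
--     no_blank = len(in_text) - len(in_text.lstrip(" "))
--     if no_blank == 0: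
--         return (False, "un_dent", "")
--     # one C-level pass: every line start is '\n' in '\n' + in_text, so removing
--     # '\n' + no_blank spaces strips exactly the indent from each line that has it
--     ret_text = ("\n" + in_text).replace("\n" + " " * no_blank, "\n")[1:]
--     return (True, "un_dentn", ret_text)
-- ===== Notes on version B (the rewrite author's own statement) =====
-- stated objective: alternative
-- what changed: A splits the text into lines, counts leading spaces of the first line with a char loop, then rebuilds each line via find/slice and joins; B counts the indent on the raw text and strips it everywhere with a single text-level replace of newline-plus-indent by newline on a sentinel-prefixed copy of the text.
import Mathlib
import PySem

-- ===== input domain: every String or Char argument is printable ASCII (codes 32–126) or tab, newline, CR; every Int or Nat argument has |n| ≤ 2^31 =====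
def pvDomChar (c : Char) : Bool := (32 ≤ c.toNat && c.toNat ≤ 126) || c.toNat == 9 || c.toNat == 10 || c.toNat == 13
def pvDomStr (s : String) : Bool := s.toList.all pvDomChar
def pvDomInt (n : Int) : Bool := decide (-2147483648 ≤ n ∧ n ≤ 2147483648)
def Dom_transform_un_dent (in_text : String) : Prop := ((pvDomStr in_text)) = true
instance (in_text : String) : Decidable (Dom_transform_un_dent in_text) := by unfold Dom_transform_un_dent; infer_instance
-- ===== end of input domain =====

-- B replaces A's per-line split/scan/join with a single text-level replace pass over the raw text.

-- ===== PORT A =====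
-- the for/break loop counting leading spaces of lines[0]
def pvCountA : List Char → Nat → Nat
  | [], no_blank => no_blank
  | c :: t, no_blank => if c ≠ ' ' then no_blank else pvCountA t (no_blank + 1)

def transform_un_dent (in_text : String) : Bool × String × String :=
  -- lines = in_text.split("\n"); sep is the non-empty literal "\n", so split? is always some
  match (PySem.Str.split? in_text "\n").getD [] with
  | [] => (false, "un_dent", "")          -- if len(lines) < 1
  | first :: rest =>
    let no_blank := pvCountA first.toList 0
    if no_blank == 0 then (false, "un_dent", "")
    else
      let delete_me := String.ofList (List.replicate no_blank ' ')  -- " " * no_blank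
      let new_lines := (first :: rest).foldl (fun acc i_line =>
        let ix_del := PySem.Str.find i_line delete_me
        if ix_del == 0 then acc ++ [PySem.Str.slice i_line (some (no_blank : Int)) none]
        else acc ++ [i_line]) ([] : List String)
      (true, "un_dentn", PySem.Str.join "\n" new_lines)

-- ===== PORT B =====
def transform_un_dent_alt (in_text : String) : Bool × String × String :=
  -- no_blank = len(in_text) - len(in_text.lstrip(" ")); lstrip(" ") has no PySem
  -- primitive, hand-ported exactly as dropWhile (· == ' ') (drop leading spaces only)
  let no_blank : Int := PySem.Str.len in_text - ((in_text.toList.dropWhile (fun c => c == ' ')).length : Int)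
  if no_blank == 0 then (false, "un_dent", "")
  else
    -- ("\n" + in_text).replace("\n" + " " * no_blank, "\n")[1:]
    let ret_text := PySem.Str.slice
      (PySem.Str.replace (String.ofList ('\n' :: in_text.toList))
        (String.ofList ('\n' :: List.replicate no_blank.toNat ' ')) "\n")
      (some 1) none
    (true, "un_dentn", ret_text)

-- ===== PRECONDITION & SPEC =====
def Spec_transform_un_dent (in_text : String) (out : Bool × String × String) : Prop := out = transform_un_dent_alt in_text
instance (in_text : String) (out : Bool × String × String) : Decidable (Spec_transform_un_dent in_text out) := by unfold Spec_transform_un_dent; infer_instance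

-- ===== CLAIM (what is proved, stated in full; the proofs are below) =====
def Claim_equal_transform_un_dent : Prop := ∀ (in_text : String), Dom_transform_un_dent in_text → Spec_transform_un_dent in_text (transform_un_dent in_text)

-- ===== LEMMAS AND PROOFS =====

-- reference single-separator split, structurally recursive
def pySplit : List Char → List (List Char)
  | [] => [[]]
  | c :: t => if c = '\n' then [] :: pySplit t else
      match pySplit t with
      | [] => [[c]]
      | h :: r => (c :: h) :: r

-- reference replace of '\n'+n·' ' by '\n', structurally recursive
def pyRepl (n : Nat) : List Char → List Char
  | [] => []
  | c :: t =>
    if c = '\n' ∧ (List.replicate n ' ').isPrefixOf t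
    then '\n' :: pyRepl n (t.drop n)
    else c :: pyRepl n t
termination_by l => l.length
decreasing_by
  · simpa using Nat.lt_succ_of_le (List.length_drop_le _ _)
  · simp

theorem pvCountA_eq (l : List Char) (k : Nat) :
    pvCountA l k = k + (l.takeWhile (fun c => c == ' ')).length := by
  induction l generalizing k with
  | nil => simp [pvCountA]
  | cons c t ih =>
    by_cases h : c = ' '
    · subst h; simp [pvCountA, List.takeWhile, ih]; omega
    · have hb : (c == ' ') = false := by simp [h]
      simp [pvCountA, List.takeWhile, h, hb]

theorem takeWhile_takeWhile_of_imp {p q : Char → Bool} (h : ∀ x, p x = true → q x = true)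
    (l : List Char) : (l.takeWhile q).takeWhile p = l.takeWhile p := by
  induction l with
  | nil => simp
  | cons c t ih =>
    by_cases hp : p c
    · have hq := h c hp
      simp [List.takeWhile, hp, hq, ih]
    · by_cases hq : q c <;>
        simp [List.takeWhile, hp, hq]

def consFst (p : List Char) : List (List Char) → List (List Char)
  | [] => [p]
  | h :: r => (p ++ h) :: r

theorem consFst_append (p q : List Char) (xs : List (List Char)) :
    consFst (p ++ q) xs = consFst p (consFst q xs) := by
  cases xs <;> simp [consFst]

theorem pySplit_ne_nil (t : List Char) : pySplit t ≠ [] := by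
  cases t with
  | nil => simp [pySplit]
  | cons c t =>
    by_cases h : c = '\n'
    · simp [pySplit, h]
    · simp only [pySplit, if_neg h]
      cases pySplit t <;> simp

theorem consFst_nil_pySplit (t : List Char) : consFst [] (pySplit t) = pySplit t := by
  cases h : pySplit t with
  | nil => exact absurd h (pySplit_ne_nil t)
  | cons a r => simp [consFst]

theorem splitOn_go_eq (fuel : Nat) : ∀ (l cur : List Char) (acc : List (List Char)),
    l.length ≤ fuel →
    PySem.Chars.splitOn.go ['\n'] fuel l cur acc = acc.reverse ++ consFst cur.reverse (pySplit l) := by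
  induction fuel with
  | zero =>
    intro l cur acc h
    have hl : l = [] := by cases l <;> simp_all
    subst hl
    rw [PySem.Chars.splitOn.go.eq_def]
    simp [consFst, pySplit]
  | succ fuel ih =>
    intro l cur acc h
    cases l with
    | nil =>
      rw [PySem.Chars.splitOn.go.eq_def]
      simp [consFst, pySplit]
    | cons c rest =>
      rw [PySem.Chars.splitOn.go.eq_def]
      dsimp only
      by_cases hc : c = '\n'
      · subst hc
        rw [if_pos (by simp [List.isPrefixOf])]
        rw [ih _ _ _ (by simpa using Nat.le_of_succ_le_succ h)]
        simp [pySplit, consFst]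
        cases hps : pySplit rest with
        | nil => exact absurd hps (pySplit_ne_nil rest)
        | cons a r => rfl
      · rw [if_neg (by simp [List.isPrefixOf]; exact fun he => hc he.symm)]
        rw [ih _ _ _ (by simpa using Nat.le_of_succ_le_succ h)]
        rw [pySplit, if_neg hc]
        have : (c :: cur).reverse = cur.reverse ++ [c] := by simp
        rw [this, consFst_append]
        cases hps : pySplit rest <;> simp [consFst]

theorem splitOn_eq_pySplit (t : List Char) : PySem.Chars.splitOn t ['\n'] = pySplit t := by
  unfold PySem.Chars.splitOn
  rw [splitOn_go_eq (t.length + 1) t [] [] (by omega)]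
  simp [consFst_nil_pySplit]

theorem pySplit_head (t : List Char) :
    ∃ r, pySplit t = (t.takeWhile (fun c => c != '\n')) :: r := by
  induction t with
  | nil => exact ⟨[], rfl⟩
  | cons c t ih =>
    by_cases h : c = '\n'
    · subst h; exact ⟨pySplit t, by simp [pySplit, List.takeWhile]⟩
    · obtain ⟨r, hr⟩ := ih
      refine ⟨r, ?_⟩
      have hb : (c != '\n') = true := by simp [h]
      rw [pySplit, if_neg h, hr, List.takeWhile, hb]

theorem replace_go_eq (n : Nat) (fuel : Nat) : ∀ (l acc : List Char),
    l.length ≤ fuel →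
    PySem.Chars.replace.go ('\n' :: List.replicate n ' ') ['\n'] fuel l acc
      = acc.reverse ++ pyRepl n l := by
  induction fuel with
  | zero =>
    intro l acc h
    have hl : l = [] := by cases l <;> simp_all
    subst hl
    rw [PySem.Chars.replace.go.eq_def]
    simp [pyRepl]
  | succ fuel ih =>
    intro l acc h
    cases l with
    | nil =>
      rw [PySem.Chars.replace.go.eq_def]
      simp [pyRepl]
    | cons c t =>
      rw [PySem.Chars.replace.go.eq_def]
      dsimp only
      by_cases hc : c = '\n' ∧ (List.replicate n ' ').isPrefixOf t
      · rw [if_pos (by simp [List.isPrefixOf, hc.1, hc.2])]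
        have hdrop : List.drop ('\n' :: List.replicate n ' ').length (c :: t) = t.drop n := by
          simp
        rw [hdrop, ih _ _ (by simp only [List.length_drop]; simp at h; omega)]
        rw [pyRepl, if_pos hc]
        simp
      · rw [if_neg (by
          simp only [List.isPrefixOf, Bool.and_eq_true, beq_iff_eq]
          rintro ⟨h1, h2⟩
          exact hc ⟨h1.symm, h2⟩)]
        rw [ih _ _ (by simpa using Nat.le_of_succ_le_succ h)]
        rw [pyRepl, if_neg hc]
        simp

theorem replace_eq_pyRepl (n : Nat) (s : List Char) :
    PySem.Chars.replace s ('\n' :: List.replicate n ' ') ['\n'] = pyRepl n s := by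
  unfold PySem.Chars.replace
  simp only [List.isEmpty_cons, Bool.false_eq_true, if_false]
  rw [replace_go_eq n s.length s [] le_rfl]
  simp

theorem pyRepl_append (n : Nat) (l s : List Char) (h : '\n' ∉ l) :
    pyRepl n (l ++ s) = l ++ pyRepl n s := by
  induction l with
  | nil => simp
  | cons c t ih =>
    have hc : ¬ (c = '\n' ∧ (List.replicate n ' ').isPrefixOf (t ++ s)) := by
      rintro ⟨rfl, -⟩; exact h (List.mem_cons_self)
    rw [List.cons_append, pyRepl, if_neg hc, ih (fun hm => h (List.mem_cons_of_mem _ hm))]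
    simp

theorem pyRepl_no_nl (n : Nat) (l : List Char) (h : '\n' ∉ l) : pyRepl n l = l := by
  have := pyRepl_append n l [] h
  simpa [pyRepl] using this

theorem pad_prefix_append (n : Nat) : ∀ (l r : List Char),
    (List.replicate n ' ').isPrefixOf (l ++ '\n' :: r) = (List.replicate n ' ').isPrefixOf l := by
  induction n with
  | zero => intro l r; simp
  | succ n ih =>
    intro l r
    cases l with
    | nil => simp [List.replicate_succ, List.isPrefixOf]
    | cons c l => simp [List.replicate_succ, List.isPrefixOf, ih]

theorem pySplit_no_nl (t : List Char) (h : '\n' ∉ t) : pySplit t = [t] := by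
  induction t with
  | nil => rfl
  | cons c t ih =>
    have hc : ¬ c = '\n' := fun hc => h (hc ▸ List.mem_cons_self)
    rw [pySplit, if_neg hc, ih (fun hm => h (List.mem_cons_of_mem _ hm))]

theorem pySplit_append (l r : List Char) (h : '\n' ∉ l) :
    pySplit (l ++ '\n' :: r) = l :: pySplit r := by
  induction l with
  | nil => simp [pySplit]
  | cons c l ih =>
    have hc : ¬ c = '\n' := fun hc => h (hc ▸ List.mem_cons_self)
    rw [List.cons_append, pySplit, if_neg hc, ih (fun hm => h (List.mem_cons_of_mem _ hm))]

theorem exists_nl_decomp (t : List Char) (h : '\n' ∈ t) :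
    ∃ l r, t = l ++ '\n' :: r ∧ '\n' ∉ l ∧ r.length < t.length := by
  induction t with
  | nil => cases h
  | cons c t ih =>
    by_cases hc : c = '\n'
    · exact ⟨[], t, by simp [hc], by simp, by simp⟩
    · have ht : '\n' ∈ t := by
        rcases List.mem_cons.mp h with h1 | h1
        · exact absurd h1.symm hc
        · exact h1
      obtain ⟨l, r, h1, h2, h3⟩ := ih ht
      exact ⟨c :: l, r, by simp [h1], by simp [h2]; exact fun he => hc he.symm, by simp; omega⟩

def pvF (n : Nat) (l : List Char) : List Char :=
  if (List.replicate n ' ').isPrefixOf l then l.drop n else l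

theorem pyRepl_main_no_nl (n : Nat) (t : List Char) (hmem : '\n' ∉ t) :
    pyRepl n ('\n' :: t) = '\n' :: PySem.Chars.join ['\n'] ((pySplit t).map (pvF n)) := by
  rw [pySplit_no_nl t hmem]
  by_cases hp : (List.replicate n ' ').isPrefixOf t
  · rw [pyRepl, if_pos ⟨rfl, hp⟩,
      pyRepl_no_nl n (t.drop n) (fun hm => hmem (List.mem_of_mem_drop hm))]
    simp [pvF, hp, PySem.Chars.join_singleton]
  · rw [pyRepl, if_neg (by rintro ⟨-, h2⟩; exact hp h2), pyRepl_no_nl n t hmem]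
    simp [pvF, hp, PySem.Chars.join_singleton]

theorem pyRepl_main (n : Nat) : ∀ (N : Nat) (t : List Char), t.length ≤ N →
    pyRepl n ('\n' :: t) = '\n' :: PySem.Chars.join ['\n'] ((pySplit t).map (pvF n)) := by
  intro N
  induction N with
  | zero =>
    intro t ht
    have : t = [] := by cases t <;> simp_all
    subst this
    exact pyRepl_main_no_nl n [] (by simp)
  | succ N ih =>
    intro t ht
    by_cases hmem : '\n' ∈ t
    · obtain ⟨l, r, rfl, hnl, hlen⟩ := exists_nl_decomp t hmem
      rw [pySplit_append l r hnl]
      obtain ⟨rr, hrr⟩ := pySplit_head r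
      by_cases hp : (List.replicate n ' ').isPrefixOf l
      · have hn : n ≤ l.length := by
          have := (List.isPrefixOf_iff_prefix.mp hp).length_le
          simpa using this
        rw [pyRepl, if_pos ⟨rfl, by rw [pad_prefix_append]; exact hp⟩,
          List.drop_append_of_le_length hn,
          pyRepl_append n (l.drop n) ('\n' :: r) (fun hm => hnl (List.mem_of_mem_drop hm)),
          ih r (by simp at ht hlen ⊢; omega)]
        rw [hrr]
        simp [pvF, hp, PySem.Chars.join_cons_cons]
      · rw [pyRepl, if_neg (by rintro ⟨-, h2⟩; rw [pad_prefix_append] at h2; exact hp h2),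
          pyRepl_append n l ('\n' :: r) hnl,
          ih r (by simp at ht hlen ⊢; omega)]
        rw [hrr]
        simp [pvF, hp, PySem.Chars.join_cons_cons]
    · exact pyRepl_main_no_nl n t hmem

theorem find_eq_zero_iff (l sub : List Char) :
    PySem.Chars.find l sub = 0 ↔ sub.isPrefixOf l := by
  constructor
  · intro h
    have h0 : (0 : Int) ≤ PySem.Chars.find l sub := by omega
    have := (PySem.Chars.find_spec h0).1
    rw [h] at this
    simpa [List.isPrefixOf_iff_prefix] using this
  · intro h
    have hpre : sub <+: l := by simpa [List.isPrefixOf_iff_prefix] using h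
    have h0 : (0 : Int) ≤ PySem.Chars.find l sub :=
      (PySem.Chars.find_nonneg_iff l sub).mpr hpre.isInfix
    rcases PySem.Chars.find_spec h0 with ⟨-, hmin⟩
    by_contra hne
    have hpos : 0 < (PySem.Chars.find l sub).toNat := by omega
    exact hmin 0 hpos (by simpa using hpre)

theorem foldl_append_map (g : String → String) : ∀ (xs : List String) (acc : List String),
    xs.foldl (fun a x => a ++ [g x]) acc = acc ++ xs.map g := by
  intro xs
  induction xs with
  | nil => simp
  | cons x xs ih => intro acc; simp [List.foldl_cons, ih]

theorem A_eval (s : String) :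
    transform_un_dent s =
      (if (s.toList.takeWhile (fun c => c == ' ')).length = 0 then (false, "un_dent", "")
       else (true, "un_dentn",
         String.ofList (PySem.Chars.join ['\n']
           ((pySplit s.toList).map (pvF (s.toList.takeWhile (fun c => c == ' ')).length))))) := by
  obtain ⟨rr, hrr⟩ := pySplit_head s.toList
  have hnl : ("\n" : String).toList = ['\n'] := rfl
  have hsplit : (PySem.Str.split? s "\n").getD []
      = String.ofList (s.toList.takeWhile (fun c => c != '\n')) :: rr.map String.ofList := by
    simp [PySem.Str.split?, PySem.Chars.split?, hnl, splitOn_eq_pySplit, hrr]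
  unfold transform_un_dent
  rw [hsplit]
  dsimp only
  have hcount : pvCountA (String.ofList (s.toList.takeWhile (fun c => c != '\n'))).toList 0
      = (s.toList.takeWhile (fun c => c == ' ')).length := by
    rw [pvCountA_eq]
    simp only [String.toList_ofList, Nat.zero_add]
    rw [takeWhile_takeWhile_of_imp]
    intro x hx
    have : x = ' ' := by simpa using hx
    simp [this]
  rw [hcount]
  by_cases hN : (s.toList.takeWhile (fun c => c == ' ')).length = 0
  · simp [hN]
  · rw [if_neg (by simpa using hN), if_neg hN]
    refine congrArg (fun z => (true, "un_dentn", z)) ?_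
    set N := (s.toList.takeWhile (fun c => c == ' ')).length with hNdef
    have hfun : (fun (acc : List String) (i_line : String) =>
        let ix_del := PySem.Str.find i_line (String.ofList (List.replicate N ' '))
        if ix_del == 0 then acc ++ [PySem.Str.slice i_line (some (N : Int)) none]
        else acc ++ [i_line])
        = (fun (acc : List String) (x : String) => acc ++
            [if PySem.Str.find x (String.ofList (List.replicate N ' ')) == 0
             then PySem.Str.slice x (some (N : Int)) none else x]) := by
      funext acc x
      dsimp only
      split <;> rfl
    rw [hfun, foldl_append_map]
    have hlines : String.ofList (s.toList.takeWhile (fun c => c != '\n')) :: rr.map String.ofList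
        = (pySplit s.toList).map String.ofList := by rw [hrr]; rfl
    rw [List.nil_append, hlines]
    rw [PySem.Str.join]
    refine congrArg String.ofList ?_
    rw [hnl]
    refine congrArg (PySem.Chars.join ['\n']) ?_
    rw [List.map_map, List.map_map]
    refine List.map_congr_left ?_
    intro l _
    show (if PySem.Str.find (String.ofList l) (String.ofList (List.replicate N ' ')) == 0
          then PySem.Str.slice (String.ofList l) (some (N : Int)) none
          else String.ofList l).toList = pvF N l
    by_cases hp : (List.replicate N ' ').isPrefixOf l
    · have hfind : PySem.Str.find (String.ofList l) (String.ofList (List.replicate N ' ')) = 0 := by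
        rw [PySem.Str.find_eq]
        simp only [String.toList_ofList]
        exact (find_eq_zero_iff l _).mpr hp
      rw [hfind]
      simp [PySem.Str.toList_slice, pvF, hp, PySem.List.slice_from_natCast]
    · have hfind : ¬ PySem.Chars.find l (List.replicate N ' ') = 0 :=
        fun h => hp ((find_eq_zero_iff l _).mp h)
      simp [pvF, hp, hfind]

theorem B_eval (s : String) :
    transform_un_dent_alt s =
      (if (s.toList.takeWhile (fun c => c == ' ')).length = 0 then (false, "un_dent", "")
       else (true, "un_dentn",
         String.ofList (PySem.Chars.join ['\n']
           ((pySplit s.toList).map (pvF (s.toList.takeWhile (fun c => c == ' ')).length))))) := by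
  set N := (s.toList.takeWhile (fun c => c == ' ')).length with hNdef
  have hlen : PySem.Str.len s - ((s.toList.dropWhile (fun c => c == ' ')).length : Int) = (N : Int) := by
    have := congrArg List.length (List.takeWhile_append_dropWhile (p := fun c => c == ' ') (l := s.toList))
    simp only [List.length_append] at this
    rw [PySem.Str.len]
    omega
  unfold transform_un_dent_alt
  rw [hlen]
  by_cases hN : N = 0
  · simp [hN]
  · rw [if_neg (by simpa using (Int.natCast_ne_zero.mpr hN)), if_neg hN]
    refine congrArg (fun z => (true, "un_dentn", z)) ?_
    have htoNat : ((N : Int)).toNat = N := rfl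
    rw [htoNat]
    have hX : (PySem.Str.replace (String.ofList ('\n' :: s.toList))
        (String.ofList ('\n' :: List.replicate N ' ')) "\n").toList
        = pyRepl N ('\n' :: s.toList) := by
      rw [PySem.Str.toList_replace]
      simp only [String.toList_ofList]
      have hnl : ("\n" : String).toList = ['\n'] := rfl
      rw [hnl, replace_eq_pyRepl]
    apply String.toList_inj.mp
    rw [PySem.Str.toList_slice, hX]
    rw [pyRepl_main N (s.toList.length) s.toList le_rfl]
    rw [PySem.Chars.slice_eq_listSlice]
    have hs : ∀ (xs : List Char), PySem.List.slice ('\n' :: xs) (some 1) none = xs := by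
      intro xs
      rw [PySem.List.slice_from ('\n' :: xs) (a := 1) (by norm_num)]
      simp
    rw [hs]
    simp

-- ===== VERDICT (by name: the statement is the Claim_ definition above) =====
theorem transform_un_dent_spec : Claim_equal_transform_un_dent := by
  intro s _
  unfold Spec_transform_un_dent
  rw [A_eval, B_eval]
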